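-- pv_equiv track=rewrite | github.com/guixiaole/traincv | MarkPicture/DebugTest/test.py | findlr
-- ===== SOURCE A (Python) =====
-- def findlr(image, boundary):
--     """
--     在图像替换的时候，寻找到他的边界。
--     :param image:
--     :param boundary:
--     :return:
--     """
--     lr = []
--     for j in range(len(image)):
--         left = 0
--         right = len(image[0])
--         for i in range(1, len(image[0])):
--             temp = image[j][i - 1][0]
--             temp1 = image[j][i][0]
--             if image[j][i - 1][0] >= boundary > image[j][i][0]:
--                 left = i
--                 break
--         for i in range(len(image[0]) - 2, 0, -1):
--             temp2 = image[j][i + 1][0]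
--             temp3 = image[j][i][0]
--             if image[j][i + 1][0] >= boundary > image[j][i][0]:
--                 right = i
--                 break
--         lr.append([left, right])
--     return lr
-- ===== SOURCE B (Python) =====
-- def findlr(image, boundary):
--     # One forward pass per row computing both boundaries (equivalence about return value).
--     lr = []
--     cols = len(image[0]) if image else 0
--     for row in image:
--         left = 0
--         right = cols
--         for p in range(1, cols):
--             prev = row[p - 1][0]
--             cur = row[p][0]
--             if left == 0 and prev >= boundary > cur:
--                 left = p
--             if p >= 2 and cur >= boundary > prev:
--                 right = p - 1
--         lr.append([left, right])
--     return lr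
-- ===== Notes on version B (the rewrite author's own statement) =====
-- stated objective: alternative
-- what changed: Replaces A's two separate scans per row (forward with break for left, backward with break for right) by a single forward pass that sets left on the first drop and overwrites right on every rise, so the last rise wins.
-- outside the precondition, e.g. on findlr([[[5], [0], [], [0], [5]]], 3): A returns [[1, 3]], B raises IndexError
import Mathlib
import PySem

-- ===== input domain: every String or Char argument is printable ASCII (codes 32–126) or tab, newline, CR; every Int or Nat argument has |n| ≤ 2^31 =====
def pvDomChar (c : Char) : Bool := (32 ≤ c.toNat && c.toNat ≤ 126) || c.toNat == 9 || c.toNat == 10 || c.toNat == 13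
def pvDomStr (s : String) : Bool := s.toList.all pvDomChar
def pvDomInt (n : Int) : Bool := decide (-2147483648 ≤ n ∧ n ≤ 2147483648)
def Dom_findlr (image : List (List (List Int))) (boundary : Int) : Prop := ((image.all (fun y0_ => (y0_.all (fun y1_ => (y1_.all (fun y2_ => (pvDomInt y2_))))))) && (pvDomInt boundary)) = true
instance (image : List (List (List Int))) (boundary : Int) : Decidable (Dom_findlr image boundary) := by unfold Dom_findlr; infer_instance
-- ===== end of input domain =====

-- B computes both boundaries of each row in ONE forward pass (first drop → left, last rise → right)
-- instead of A's two scans with break; equivalence is about the return value.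

-- ===== PORT A =====
-- image[j][i][0]: total via default 0; Pre_findlr guarantees every accessed index is in range.
def pvPix (row : List (List Int)) (i : Nat) : Int := (row.getD i []).headD 0

-- for i in range(1, cols): if image[j][i-1][0] >= boundary > image[j][i][0]: left = i; break
def findlrLeftLoop (row : List (List Int)) (boundary : Int) (cols i : Nat) : Int :=
  if _h : i < cols then
    if pvPix row (i - 1) ≥ boundary ∧ boundary > pvPix row i then (i : Int)
    else findlrLeftLoop row boundary cols (i + 1)
  else 0
termination_by cols - i

-- for i in range(cols - 2, 0, -1): if image[j][i+1][0] >= boundary > image[j][i][0]: right = i; break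
def findlrRightLoop (row : List (List Int)) (boundary : Int) (cols i : Nat) : Int :=
  if _h : 1 ≤ i then
    if pvPix row (i + 1) ≥ boundary ∧ boundary > pvPix row i then (i : Int)
    else findlrRightLoop row boundary cols (i - 1)
  else (cols : Int)
termination_by i

def findlr (image : List (List (List Int))) (boundary : Int) : List (List Int) :=
  let cols := (image.headD []).length
  image.map (fun row =>
    [findlrLeftLoop row boundary cols 1, findlrRightLoop row boundary cols (cols - 2)])

-- ===== PORT B =====
-- single forward pass carrying (left, right); left set once, right overwritten on every rise
def findlrAltLoop (row : List (List Int)) (boundary : Int) (cols p : Nat)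
    (left right : Int) : Int × Int :=
  if _h : p < cols then
    let prev := pvPix row (p - 1)
    let cur := pvPix row p
    let left' := if left = 0 ∧ prev ≥ boundary ∧ boundary > cur then (p : Int) else left
    let right' := if 2 ≤ p ∧ cur ≥ boundary ∧ boundary > prev then (p : Int) - 1 else right
    findlrAltLoop row boundary cols (p + 1) left' right'
  else (left, right)
termination_by cols - p

def findlr_alt (image : List (List (List Int))) (boundary : Int) : List (List Int) :=
  let cols := (image.headD []).length
  image.map (fun row =>
    let lr := findlrAltLoop row boundary cols 1 0 (cols : Int)
    [lr.1, lr.2])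

-- ===== PRECONDITION & SPEC =====
-- Pre_ excludes images with a row shorter than the first row or an empty pixel among its
-- first cols entries: there Python A raises IndexError, except for rare inputs where both
-- of A's breaks fire before the bad entry — on those A returns but B (which scans every
-- column) raises, so they are excluded too (see the cite).
def Pre_findlr (image : List (List (List Int))) (boundary : Int) : Prop :=
  (image.headD []).length ≤ 1 ∨
  ∀ row ∈ image, (image.headD []).length ≤ row.length ∧
    ∀ px ∈ row.take (image.headD []).length, px ≠ []
instance (image : List (List (List Int))) (boundary : Int) : Decidable (Pre_findlr image boundary) := by unfold Pre_findlr; infer_instance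
def pvWitness_findlr : List (List (List Int)) × Int := ([[[5], [0]]], 3)
def Spec_findlr (image : List (List (List Int))) (boundary : Int) (out : List (List Int)) : Prop := out = findlr_alt image boundary
instance (image : List (List (List Int))) (boundary : Int) (out : List (List Int)) : Decidable (Spec_findlr image boundary out) := by unfold Spec_findlr; infer_instance

-- ===== CLAIM (what is proved, stated in full; the proofs are below) =====
def Claim_equal_findlr : Prop := ∀ (image : List (List (List Int))) (boundary : Int), Dom_findlr image boundary → Pre_findlr image boundary → Spec_findlr image boundary (findlr image boundary)

-- ===== LEMMAS AND PROOFS =====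

-- once left is nonzero it is never changed
theorem altLoop_fst_frozen (row : List (List Int)) (boundary : Int) (cols : Nat) :
    ∀ p (l r : Int), l ≠ 0 → (findlrAltLoop row boundary cols p l r).1 = l := by
  intro p l r hl
  fun_induction findlrAltLoop row boundary cols p l r with
  | case1 p l r h prev cur left' right' ih =>
      have : left' = l := by simp [left', hl]
      rw [this] at ih ⊢
      exact ih hl
  | case2 => rfl

-- the first component of B's loop computes A's forward break loop
theorem altLoop_fst (row : List (List Int)) (boundary : Int) (cols : Nat) :
    ∀ p (r : Int), 1 ≤ p →
      (findlrAltLoop row boundary cols p 0 r).1 = findlrLeftLoop row boundary cols p := by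
  intro p r hp
  fun_induction findlrLeftLoop row boundary cols p generalizing r with
  | case1 i h hc =>
      rw [findlrAltLoop, dif_pos h]
      simp only [true_and, hc, if_pos]
      have : ((i : Int)) ≠ 0 := by exact_mod_cast Nat.one_le_iff_ne_zero.mp hp
      simp [altLoop_fst_frozen row boundary cols (i+1) _ _ this]
  | case2 i h hc ih =>
      rw [findlrAltLoop, dif_pos h]
      simp only [true_and, hc, if_false]
      exact ih _ (by omega)
  | case3 i h =>
      rw [findlrAltLoop, dif_neg h]

-- the second component of B's loop is a left fold over the remaining columns
theorem altLoop_snd (row : List (List Int)) (boundary : Int) (cols : Nat) :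
    ∀ p (l r : Int),
      (findlrAltLoop row boundary cols p l r).2 =
        List.foldl (fun r q =>
            if 2 ≤ q ∧ pvPix row q ≥ boundary ∧ boundary > pvPix row (q - 1)
            then (q : Int) - 1 else r)
          r (List.range' p (cols - p)) := by
  intro p l r
  fun_induction findlrAltLoop row boundary cols p l r with
  | case1 p l r h prev cur left' right' ih =>
      have hr : cols - p = (cols - (p + 1)) + 1 := by omega
      rw [hr, List.range'_succ, List.foldl_cons, ih]
      rfl
  | case2 p l r h =>
      have : cols - p = 0 := by omega
      simp [this]

-- the overwrite fold equals A's backward break loop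
theorem foldl_eq_rightLoop (row : List (List Int)) (boundary : Int) (cols : Nat) :
    ∀ m : Nat,
      List.foldl (fun r q =>
          if 2 ≤ q ∧ pvPix row q ≥ boundary ∧ boundary > pvPix row (q - 1)
          then (q : Int) - 1 else r)
        (cols : Int) (List.range' 1 m) =
      findlrRightLoop row boundary cols (m - 1) := by
  intro m
  induction m with
  | zero =>
      simp [findlrRightLoop]
  | succ m ih =>
      rw [List.range'_concat, List.foldl_append, List.foldl_cons, List.foldl_nil, ih]
      have e1 : 1 + 1 * m = m + 1 := by omega
      rw [e1]
      by_cases hm : 1 ≤ m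
      · conv_rhs => rw [show m + 1 - 1 = m from by omega, findlrRightLoop]
        rw [dif_pos hm]
        have h2 : 2 ≤ m + 1 := by omega
        simp only [h2, true_and, Nat.add_sub_cancel]
        split_ifs with hc
        · push_cast; ring
        · rfl
      · have hm0 : m = 0 := by omega
        subst hm0
        simp [findlrRightLoop]

-- ===== VERDICT (by name: the statement is the Claim_ definition above) =====
theorem findlr_spec : Claim_equal_findlr := by
  intro image boundary _dom _pre
  unfold Spec_findlr findlr findlr_alt
  apply List.map_congr_left
  intro row _hrow
  have h1 := altLoop_fst row boundary (image.headD []).length 1 ((image.headD []).length : Int) (le_refl 1)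
  have h2 := altLoop_snd row boundary (image.headD []).length 1 0 ((image.headD []).length : Int)
  have h3 := foldl_eq_rightLoop row boundary (image.headD []).length ((image.headD []).length - 1)
  have hmm : (image.headD []).length - 1 - 1 = (image.headD []).length - 2 := by omega
  rw [hmm] at h3
  simp only []
  rw [h1, h2, h3]
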